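-- pv_equiv track=rewrite | github.com/abel1927/K-retrieval | K-retrieval_API/pre-processing.py | Preparation
-- ===== SOURCE A (Python) =====
-- def Preparation(list_doc):
--
--
--     total=set(list_doc[0][1])
--     i=1
--
--     while i <= len(list_doc)-1 :
--         total=total.union(list_doc[i][1])
--         i+=1
--
--     j=len(list_doc)
--     lists_dir=[]
--     i=0
--     while i<j:
--         lists_dir.append((list_doc[i][0], dict.fromkeys(total, 0)))
--         i+=1
--
--     i=0
--     for doc in list_doc:
--         for word in doc[1]:
--             lists_dir[i][1][word]+=1
--         i+=1
--     return lists_dir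
-- ===== SOURCE B (Python) =====
-- def Preparation(list_doc):
--     # Build a term-document count matrix: one vector of per-document counts per word,
--     # filled in a single pass, then project column i out for each document.
--     n = len(list_doc)
--     cols = {}
--     for i, (_, words) in enumerate(list_doc):
--         for w in words:
--             col = cols.setdefault(w, [0] * n)
--             col[i] += 1
--     return [(name, {w: col[i] for w, col in cols.items()})
--             for i, (name, _) in enumerate(list_doc)]
-- ===== Notes on version B (the rewrite author's own statement) =====
-- stated objective: alternative
-- what changed: A builds the union vocabulary, allocates an all-zero dict per document and runs an increment pass per document; B builds a term-document count matrix in one pass (cols.setdefault(w,[0]*n)[i] += 1, one per-document count vector per word) and emits each output dict as the projection of column i, so the per-document zero-init and increment passes disappear.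
import Mathlib
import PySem

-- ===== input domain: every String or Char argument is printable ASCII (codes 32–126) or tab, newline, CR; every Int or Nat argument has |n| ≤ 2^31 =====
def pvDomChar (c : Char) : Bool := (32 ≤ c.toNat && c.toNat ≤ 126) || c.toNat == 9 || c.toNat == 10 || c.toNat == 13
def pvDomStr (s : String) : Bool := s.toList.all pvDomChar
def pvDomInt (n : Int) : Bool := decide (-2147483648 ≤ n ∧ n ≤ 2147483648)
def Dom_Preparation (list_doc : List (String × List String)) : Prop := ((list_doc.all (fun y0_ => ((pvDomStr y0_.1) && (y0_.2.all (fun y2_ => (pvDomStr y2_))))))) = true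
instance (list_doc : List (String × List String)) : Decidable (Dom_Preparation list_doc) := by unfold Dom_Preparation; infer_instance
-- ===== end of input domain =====

-- B replaces A's "union vocabulary, zero-init a dict per document, one increment pass" with a
-- term-document COUNT MATRIX: one pass builds, per word, a vector of per-document counts
-- (cols.setdefault(w, [0]*n)[i] += 1), and each output dict is the projection of column i
-- (alternative decomposition; not faster).

-- ===== PORT A =====
-- A's union loop (while i <= len-1: total = total.union(list_doc[i][1])) as a fold over the tail.
def Preparation (list_doc : List (String × List String)) : List (String × (List (String × Int))) :=
  match list_doc with
  | [] => []  -- Python raises IndexError at list_doc[0]; excluded by Pre_Preparation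
  | d0 :: rest =>
    let total : PySem.Set String :=
      rest.foldl (fun t d => PySem.Set.update t d.2) (PySem.Set.ofList d0.2)
    -- while i < j: append (name, dict.fromkeys(total, 0))
    let listsDir : List (String × PySem.Dict String Int) :=
      (d0 :: rest).map (fun d => (d.1, PySem.Dict.mk (total.map (fun w => (w, (0 : Int))))))
    -- i = 0; for doc in list_doc: for word in doc[1]: lists_dir[i][1][word] += 1; i += 1
    List.zipWith
      (fun d e => (e.1, (d.2.foldl (fun dd w => dd.modify w 0 (fun v => v + 1)) e.2).items))
      (d0 :: rest) listsDir

-- ===== PORT B =====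
-- cols.setdefault(w, [0]*n); col[i] += 1 (in-place, each vector owned by one key) is ported as
-- Dict.modify w (replicate n 0) (set i (· + 1)); col[i] is exact via List.getD since i < n = |col|.
def Preparation_alt (list_doc : List (String × List String)) : List (String × (List (String × Int))) :=
  let n := list_doc.length
  let cols : PySem.Dict String (List Int) :=
    (list_doc.zipIdx).foldl
      (fun d p => p.1.2.foldl
        (fun d w => d.modify w (List.replicate n (0 : Int))
          (fun col => col.set p.2 (col.getD p.2 0 + 1))) d)
      PySem.Dict.empty
  (list_doc.zipIdx).map (fun p => (p.1.1, cols.items.map (fun q => (q.1, q.2.getD p.2 0))))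

-- ===== PRECONDITION & SPEC =====
-- Pre_ excludes only the empty list, on which A raises IndexError at list_doc[0].
def Pre_Preparation (list_doc : List (String × List String)) : Prop := list_doc ≠ []
instance (list_doc : List (String × List String)) : Decidable (Pre_Preparation list_doc) := by unfold Pre_Preparation; infer_instance
def pvWitness_Preparation : (List (String × List String)) := [("a", ["x","y","x"]), ("b", ["y"])]

def Spec_Preparation (list_doc : List (String × List String)) (out : List (String × (List (String × Int)))) : Prop := out = Preparation_alt list_doc
instance (list_doc : List (String × List String)) (out : List (String × (List (String × Int)))) : Decidable (Spec_Preparation list_doc out) := by unfold Spec_Preparation; infer_instance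

-- ===== CLAIM (what is proved, stated in full; the proofs are below) =====
def Claim_equal_Preparation : Prop := ∀ (list_doc : List (String × List String)), Dom_Preparation list_doc → Pre_Preparation list_doc → Spec_Preparation list_doc (Preparation list_doc)

-- ===== LEMMAS AND PROOFS =====

-- membership is preserved by the union fold
theorem pv_mem_foldl_update {s : PySem.Set String} {w : String}
    (rest : List (String × List String)) (h : w ∈ s) :
    w ∈ rest.foldl (fun t d => PySem.Set.update t d.2) s := by
  induction rest generalizing s with
  | nil => exact h
  | cons d rest ih => exact ih ((PySem.Set.mem_update s d.2 w).2 (Or.inl h))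

-- a word of a member document lands in the fold from any start set
theorem pv_mem_foldl_update_of_mem {w : String} {d : String × List String}
    (rest : List (String × List String)) (hd : d ∈ rest) (hw : w ∈ d.2) :
    ∀ s : PySem.Set String, w ∈ rest.foldl (fun t d => PySem.Set.update t d.2) s := by
  induction rest with
  | nil => cases hd
  | cons e rest ih =>
    intro s
    rcases List.mem_cons.1 hd with rfl | he
    · exact pv_mem_foldl_update rest ((PySem.Set.mem_update _ d.2 w).2 (Or.inr hw))
    · exact ih he _

-- every word of every document lands in the vocabulary fold
theorem pv_subset_total (d0 : String × List String) (rest : List (String × List String))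
    {d : String × List String} (hd : d ∈ d0 :: rest) {w : String} (hw : w ∈ d.2) :
    w ∈ rest.foldl (fun t d => PySem.Set.update t d.2) (PySem.Set.ofList d0.2) := by
  rcases List.mem_cons.1 hd with rfl | hmem
  · exact pv_mem_foldl_update rest ((PySem.Set.mem_ofList d.2 w).2 hw)
  · exact pv_mem_foldl_update_of_mem rest hmem hw _

-- the vocabulary fold has no duplicates
theorem pv_nodup_total {s : PySem.Set String} (rest : List (String × List String))
    (h : List.Nodup s) :
    List.Nodup (rest.foldl (fun t d => PySem.Set.update t d.2) s) := by
  induction rest generalizing s with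
  | nil => exact h
  | cons d rest ih => exact ih (PySem.Set.nodup_update s d.2 h)

-- the all-zero dict lookup
theorem pv_getD_mk_zero (ks : List String) (k : String) :
    (PySem.Dict.mk (ks.map (fun w => (w, (0 : Int))))).getD k 0 = 0 := by
  induction ks with
  | nil => simp [PySem.Dict.getD, PySem.Dict.get?]
  | cons a ks ih =>
    simp only [List.map_cons, PySem.Dict.getD_eq_get?_getD, PySem.Dict.get?_mk_cons]
    split
    · rfl
    · simpa [PySem.Dict.getD_eq_get?_getD] using ih

-- counting pass over an all-zero dict on nodup keys = the direct count map
theorem pv_count_pass (total : PySem.Set String) (ws : List String)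
    (hnd : List.Nodup total) (hsub : ∀ w ∈ ws, w ∈ total) :
    (ws.foldl (fun dd w => dd.modify w 0 (fun v => v + 1))
        (PySem.Dict.mk (total.map (fun w => (w, (0 : Int)))))).items
      = total.map (fun w => (w, (PySem.List.count ws w : Int))) := by
  have hkeys0 : (PySem.Dict.mk (total.map (fun w => (w, (0 : Int))))).keys = total := by
    simp [PySem.Dict.keys_mk, Function.comp_def]
  have hfilter : List.filter (fun y => !PySem.Set.contains total y) (PySem.Set.ofList ws) = [] := by
    rw [List.filter_eq_nil_iff]
    intro y hy
    simp
    exact hsub y ((PySem.Set.mem_ofList ws y).1 hy)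
  have hkeys : (ws.foldl (fun dd w => dd.modify w 0 (fun v => v + 1))
      (PySem.Dict.mk (total.map (fun w => (w, (0 : Int)))))).keys = total := by
    rw [PySem.Dict.keys_foldl_modify ws 0 (fun _ _ => (fun v => v + 1)) _, hkeys0,
        PySem.Set.update_eq_append_filter, hfilter, List.append_nil]
  have hndk : (ws.foldl (fun dd w => dd.modify w 0 (fun v => v + 1))
      (PySem.Dict.mk (total.map (fun w => (w, (0 : Int)))))).keys.Nodup := by
    rw [hkeys]; exact hnd
  rw [PySem.Dict.items_eq_map_keys _ hndk 0, hkeys]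
  refine List.map_congr_left (fun k hk => ?_)
  rw [PySem.Dict.getD_foldl_modify_add_one, pv_getD_mk_zero]
  simp [PySem.List.count_eq]

-- ---- B side ----

-- abbreviations used only in the proofs below
def pvStep (n : Nat) (i : Nat) (d : PySem.Dict String (List Int)) (w : String) :
    PySem.Dict String (List Int) :=
  d.modify w (List.replicate n (0 : Int)) (fun col => col.set i (col.getD i 0 + 1))

def pvOuter (n : Nat) (d : PySem.Dict String (List Int))
    (ps : List ((String × List String) × Nat)) : PySem.Dict String (List Int) :=
  ps.foldl (fun d p => p.1.2.foldl (pvStep n p.2) d) d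

theorem pv_len_inner (n i : Nat) (ws : List String) (d : PySem.Dict String (List Int))
    (h : ∀ k, (d.getD k (List.replicate n 0)).length = n) :
    ∀ k, ((ws.foldl (pvStep n i) d).getD k (List.replicate n 0)).length = n := by
  induction ws generalizing d with
  | nil => exact h
  | cons w ws ih =>
    rw [List.foldl_cons]
    refine ih _ (fun k => ?_)
    unfold pvStep
    rw [PySem.Dict.getD_modify]
    split
    · simp [h w]
    · exact h k

-- inner fold at its own index i adds the count
theorem pv_inner_self (n i : Nat) (hi : i < n) (ws : List String)
    (d : PySem.Dict String (List Int))
    (hlen : ∀ k, (d.getD k (List.replicate n 0)).length = n) (k : String) :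
    ((ws.foldl (pvStep n i) d).getD k (List.replicate n 0)).getD i 0
      = (d.getD k (List.replicate n 0)).getD i 0 + PySem.List.count ws k := by
  induction ws generalizing d with
  | nil => simp [PySem.List.count]
  | cons w ws ih =>
    have hlen' : ∀ k, ((pvStep n i d w).getD k (List.replicate n 0)).length = n := by
      intro k
      unfold pvStep
      rw [PySem.Dict.getD_modify]
      split
      · simp [hlen w]
      · exact hlen k
    rw [List.foldl_cons, ih _ hlen']
    have hstep : ((pvStep n i d w).getD k (List.replicate n 0)).getD i 0
        = (d.getD k (List.replicate n 0)).getD i 0 + (if k = w then 1 else 0) := by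
      unfold pvStep
      rw [PySem.Dict.getD_modify]
      by_cases hkw : k = w
      · subst hkw
        rw [if_pos rfl, if_pos rfl, List.getD_eq_getElem?_getD,
            List.getElem?_set_self (by rw [hlen k]; exact hi)]
        simp
      · rw [if_neg hkw, if_neg hkw, add_zero]
    rw [hstep]
    have hcnt : PySem.List.count (w :: ws) k
        = (if k = w then 1 else 0) + PySem.List.count ws k := by
      simp [PySem.List.count_eq, List.count_cons]
      by_cases hkw : k = w
      · simp [hkw]
        omega
      · simp [hkw, eq_comm]

    rw [hcnt]
    push_cast
    split <;> ring

-- inner fold at a different index changes nothing at position j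
theorem pv_inner_other (n i j : Nat) (hij : i ≠ j) (ws : List String)
    (d : PySem.Dict String (List Int)) (k : String) :
    ((ws.foldl (pvStep n i) d).getD k (List.replicate n 0)).getD j 0
      = (d.getD k (List.replicate n 0)).getD j 0 := by
  induction ws generalizing d with
  | nil => rfl
  | cons w ws ih =>
    rw [List.foldl_cons, ih]
    show ((pvStep n i d w).getD k (List.replicate n 0)).getD j 0 = _
    unfold pvStep
    rw [PySem.Dict.getD_modify]
    by_cases hkw : k = w
    · subst hkw
      rw [if_pos rfl, List.getD_eq_getElem?_getD, List.getElem?_set_ne hij,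
          ← List.getD_eq_getElem?_getD]
    · rw [if_neg hkw]

-- outer fold over pairs whose indices avoid j changes nothing at position j
theorem pv_outer_other (n j : Nat) (ps : List ((String × List String) × Nat))
    (hj : ∀ p ∈ ps, p.2 ≠ j) (d : PySem.Dict String (List Int)) (k : String) :
    ((pvOuter n d ps).getD k (List.replicate n 0)).getD j 0
      = (d.getD k (List.replicate n 0)).getD j 0 := by
  induction ps generalizing d with
  | nil => rfl
  | cons p ps ih =>
    rw [pvOuter, List.foldl_cons, ← pvOuter, ih (fun q hq => hj q (List.mem_cons_of_mem p hq)),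
        pv_inner_other n p.2 j (hj p (List.mem_cons_self) ) p.1.2]

-- main matrix invariant: after the whole outer fold, column i of row k is the count of k in doc i
theorem pv_outer_main (n : Nat) (docs : List (String × List String)) (off : Nat)
    (hoff : off + docs.length ≤ n)
    (d : PySem.Dict String (List Int))
    (hlen : ∀ k, (d.getD k (List.replicate n 0)).length = n)
    (hzero : ∀ k j, off ≤ j → (d.getD k (List.replicate n 0)).getD j 0 = 0)
    {doc : String × List String} {i : Nat}
    (hmem : (doc, i) ∈ docs.zipIdx off) (k : String) :
    ((pvOuter n d (docs.zipIdx off)).getD k (List.replicate n 0)).getD i 0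
      = PySem.List.count doc.2 k := by
  induction docs generalizing d off with
  | nil => cases hmem
  | cons d1 docs ih =>
    rw [List.zipIdx_cons] at hmem ⊢
    rw [pvOuter, List.foldl_cons, ← pvOuter]
    rcases List.mem_cons.1 hmem with heq | hmem'
    · injection heq with h1 h2
      subst h1; subst h2
      have hidx : ∀ p ∈ docs.zipIdx (i + 1), p.2 ≠ i := by
        intro p hp
        have := (List.mem_zipIdx hp).1  -- i + 1 ≤ p.2
        omega
      rw [pv_outer_other n i _ hidx]
      rw [pv_inner_self n i (by simp at hoff; omega) _ _ hlen]
      rw [hzero k i (le_refl i)]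
      simp
    · have hz' : ∀ k j, off + 1 ≤ j →
          (((d1, off).1.2.foldl (pvStep n (d1, off).2) d).getD k (List.replicate n 0)).getD j 0 = 0 := by
        intro k' j hj
        rw [pv_inner_other n off j (by omega)]
        exact hzero k' j (by omega)
      exact ih (off + 1) (by simp at hoff ⊢; omega) _
        (pv_len_inner n off d1.2 d hlen) hz' hmem'

-- keys of the matrix fold = the vocabulary fold of A
theorem pv_keys_outer (n : Nat) (docs : List (String × List String)) (off : Nat)
    (d : PySem.Dict String (List Int)) :
    (pvOuter n d (docs.zipIdx off)).keys
      = docs.foldl (fun t doc => PySem.Set.update t doc.2) d.keys := by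
  induction docs generalizing d off with
  | nil => rfl
  | cons d1 docs ih =>
    rw [List.zipIdx_cons, pvOuter, List.foldl_cons, ← pvOuter, ih, List.foldl_cons]
    congr 1
    exact PySem.Dict.keys_foldl_modify d1.2 (List.replicate n 0)
      (fun _ _ => (fun col => col.set off (col.getD off 0 + 1))) d

-- ===== VERDICT (by name: the statement is the Claim_ definition above) =====
theorem Preparation_spec : Claim_equal_Preparation := by
  intro list_doc _ hpre
  unfold Spec_Preparation
  match list_doc with
  | [] => exact absurd rfl hpre
  | d0 :: rest =>
    unfold Preparation Preparation_alt
    simp only []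
    set n := (d0 :: rest).length with hn
    set total := rest.foldl (fun t d => PySem.Set.update t d.2) (PySem.Set.ofList d0.2) with htot
    set cols := pvOuter n PySem.Dict.empty ((d0 :: rest).zipIdx 0) with hcols
    have hnd : List.Nodup total := pv_nodup_total rest (PySem.Set.nodup_ofList d0.2)
    have hkeys : cols.keys = total := by
      rw [hcols, pv_keys_outer]
      simp only [PySem.Dict.keys_empty, List.foldl_cons]
      rw [PySem.Set.update_nil_left]
    have hndk : cols.keys.Nodup := by rw [hkeys]; exact hnd
    have hlen0 : ∀ k, ((PySem.Dict.empty : PySem.Dict String (List Int)).getD k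
        (List.replicate n 0)).length = n := by
      intro k; simp [PySem.Dict.getD_empty]
    have hzero0 : ∀ (k : String) (j : Nat), 0 ≤ j →
        (((PySem.Dict.empty : PySem.Dict String (List Int)).getD k
          (List.replicate n 0)).getD j 0) = 0 := by
      intro k j _
      rw [PySem.Dict.getD_empty]
      simp [List.getD_eq_getElem?_getD, List.getElem?_replicate]
      split <;> rfl
    -- A's side, as before: zipWith collapses to a map
    rw [List.zipWith_map_right, List.zipWith_self]
    -- B's side: turn zipIdx map into a map via first projection
    have hfst : ((d0 :: rest).zipIdx 0).map Prod.fst = d0 :: rest := List.zipIdx_map_fst 0 _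
    conv_lhs => rw [← hfst, List.map_map]
    refine List.map_congr_left (fun p hp => ?_)
    have hmemdoc : p.1 ∈ d0 :: rest := by
      have := List.zipIdx_map_fst 0 (d0 :: rest)
      exact this ▸ List.mem_map_of_mem hp
    simp only [Function.comp]
    congr 1
    -- A's items at p.1 = total.map count; B's projection of column p.2
    rw [pv_count_pass total p.1.2 hnd (fun w hw => pv_subset_total d0 rest hmemdoc hw)]
    have hfold : (List.foldl
        (fun d p =>
          List.foldl (fun d w => d.modify w (List.replicate n (0 : Int))
            fun col => col.set p.2 (col.getD p.2 0 + 1)) d p.1.2)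
        PySem.Dict.empty ((d0 :: rest).zipIdx)) = cols := rfl
    rw [hfold]
    rw [PySem.Dict.items_eq_map_keys cols hndk (List.replicate n 0), hkeys, List.map_map]
    refine (List.map_congr_left (fun k hk => ?_)).symm
    simp only [Function.comp]
    congr 1
    exact pv_outer_main n (d0 :: rest) 0 (by omega) PySem.Dict.empty hlen0 hzero0
      (doc := p.1) (i := p.2) (by simpa using hp) k
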